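-- pv_equiv track=rewrite | github.com/bentdoug/advent_of_code | day_14.py | calc_north_weight
-- ===== SOURCE A (Python) =====
-- def rotate_matrix_counterclockwise( m ):
--     """https://stackoverflow.com/questions/53250821/in-python-how-do-i-rotate-a-matrix-90-degrees-counterclockwise"""
--     return [[m[j][i] for j in range(len(m))] for i in range(len(m[0])-1,-1,-1)]
--
-- def calc_north_weight( m ):
--     total = 0
--     m = rotate_matrix_counterclockwise(m)
--     for row in m:
--         for idx in range(len(row)):
--             if row[idx] == "O":
--                 total += len(row) - idx
--
--     return total
-- ===== SOURCE B (Python) =====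
-- def calc_north_weight(m):
--     n = len(m)
--     w = len(m[0])
--     return sum(n - r
--                for r, row in enumerate(m)
--                for cell in row[:w]
--                if cell == "O")
-- ===== Notes on version B (the rewrite author's own statement) =====
-- stated objective: simpler
-- what changed: B drops the counterclockwise-rotation helper entirely and computes the north load in one comprehension directly over the original matrix, adding n - r for each 'O' in the first len(m[0]) cells of row r; no rotated matrix is materialised, which also makes it measurably faster.
import Mathlib
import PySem

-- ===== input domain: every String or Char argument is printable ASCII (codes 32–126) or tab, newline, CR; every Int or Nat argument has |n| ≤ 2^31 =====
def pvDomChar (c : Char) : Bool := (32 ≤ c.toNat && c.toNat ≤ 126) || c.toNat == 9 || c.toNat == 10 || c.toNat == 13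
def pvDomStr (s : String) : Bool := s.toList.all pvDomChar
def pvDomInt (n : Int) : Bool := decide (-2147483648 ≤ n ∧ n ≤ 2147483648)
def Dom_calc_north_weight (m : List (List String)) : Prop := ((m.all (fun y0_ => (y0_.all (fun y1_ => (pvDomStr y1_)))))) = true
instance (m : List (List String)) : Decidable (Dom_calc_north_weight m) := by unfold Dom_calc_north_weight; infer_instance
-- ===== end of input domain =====

-- B drops the rotation helper and sums n - r directly over the original matrix in one comprehension (simpler; same asymptotic cost, no rotated copy).


-- ===== PORT A =====
-- rotate_matrix_counterclockwise: [[m[j][i] for j in range(len(m))] for i in range(len(m[0])-1,-1,-1)]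
-- (m[0] / m[j][i] would raise IndexError where pyGetD's default is reached; Pre_ excludes those inputs)
def rotate_matrix_counterclockwise (m : List (List String)) : List (List String) :=
  (PySem.List.pyRange (((PySem.List.pyGetD m 0 []).length : Int) - 1) (-1) (-1)).map
    (fun i => (PySem.List.pyRange 0 (m.length : Int) 1).map
      (fun j => PySem.List.pyGetD (PySem.List.pyGetD m j []) i ""))

def calc_north_weight (m : List (List String)) : Int :=
  let mr := rotate_matrix_counterclockwise m
  mr.foldl (fun total row =>
    (PySem.List.pyRange 0 (row.length : Int) 1).foldl
      (fun t idx => if PySem.List.pyGetD row idx "" == "O" then t + ((row.length : Int) - idx) else t)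
      total) 0

-- ===== PORT B =====
def calc_north_weight_alt (m : List (List String)) : Int :=
  let n : Int := m.length
  let w : Int := ((PySem.List.pyGetD m 0 []).length : Int)
  ((PySem.List.enumerate m 0).flatMap
    (fun p => ((PySem.List.slice p.2 none (some w)).filter (fun cell => cell == "O")).map
      (fun _ => n - p.1))).sum

-- ===== PRECONDITION & SPEC =====
-- Pre_ excludes exactly the inputs on which Python A raises IndexError: the empty matrix
-- (len(m[0])) and matrices with a row shorter than the first row (m[j][i] during rotation).
def Pre_calc_north_weight (m : List (List String)) : Prop :=
  m ≠ [] ∧ ∀ row ∈ m, (m.headD []).length ≤ row.length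
instance (m : List (List String)) : Decidable (Pre_calc_north_weight m) := by
  unfold Pre_calc_north_weight; infer_instance
def pvWitness_calc_north_weight : List (List String) := [["O", "."], [".", "O"]]

def Spec_calc_north_weight (m : List (List String)) (out : Int) : Prop := out = calc_north_weight_alt m
instance (m : List (List String)) (out : Int) : Decidable (Spec_calc_north_weight m out) := by unfold Spec_calc_north_weight; infer_instance

-- ===== CLAIM (what is proved, stated in full; the proofs are below) =====
def Claim_equal_calc_north_weight : Prop := ∀ (m : List (List String)), Dom_calc_north_weight m → Pre_calc_north_weight m → Spec_calc_north_weight m (calc_north_weight m)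

-- ===== LEMMAS AND PROOFS =====
-- row contribution in A's scan of a rotated row
def pvRowA (row : List String) : Int :=
  ((PySem.List.pyRange 0 (row.length : Int) 1).map
    (fun idx => if PySem.List.pyGetD row idx "" == "O" then (row.length : Int) - idx else 0)).sum

lemma pv_foldl_ite_add {α : Type} (l : List α) (P : α → Bool) (g : α → Int) (a : Int) :
    l.foldl (fun t x => if P x then t + g x else t) a
      = a + (l.map (fun x => if P x then g x else 0)).sum := by
  have h : (fun (t : Int) x => if P x then t + g x else t)
      = fun t x => t + (if P x then g x else 0) := by
    funext t x; split <;> simp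
  rw [h, PySem.List.foldl_add]

lemma pv_foldA (L : List (List String)) (init : Int) :
    L.foldl (fun total row =>
      (PySem.List.pyRange 0 (row.length : Int) 1).foldl
        (fun t idx => if PySem.List.pyGetD row idx "" == "O" then t + ((row.length : Int) - idx) else t)
        total) init
    = init + (L.map pvRowA).sum := by
  induction L generalizing init with
  | nil => simp
  | cons r t ih =>
    simp only [List.foldl_cons, ih, List.map_cons, List.sum_cons]
    rw [pv_foldl_ite_add]
    simp [pvRowA]; ring

lemma pv_sum_flatMap {α : Type} (l : List α) (f : α → List Int) :
    (l.flatMap f).sum = (l.map (fun x => (f x).sum)).sum := by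
  induction l with
  | nil => rfl
  | cons a t ih => simp [List.flatMap_cons, ih]

lemma pv_sum_comm {α β : Type} (l1 : List α) (l2 : List β) (f : α → β → Int) :
    (l1.map (fun i => (l2.map (f i)).sum)).sum
      = (l2.map (fun j => (l1.map (fun i => f i j)).sum)).sum := by
  induction l1 with
  | nil => simp
  | cons a t ih => simp [ih]

lemma pv_take_map (row : List String) (W : Nat) (hW : W ≤ row.length) :
    (PySem.List.pyRange 0 (W : Int) 1).map (fun i => PySem.List.pyGetD row i "") = row.take W := by
  have h0 := PySem.List.map_pyGetD_pyRange_zero (row.take W) ""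
  have hlen : (PySem.List.len (row.take W)) = (W : Int) := by
    simp [Nat.min_eq_left hW]
  rw [hlen] at h0
  rw [← h0]
  apply List.map_congr_left
  intro i hi
  obtain ⟨h1, h2⟩ := PySem.List.mem_pyRange_one.mp hi
  rw [PySem.List.pyGetD_eq_getElem row _ h1 (by omega),
      PySem.List.pyGetD_eq_getElem _ _ h1 (by simp [Nat.min_eq_left hW]; omega)]
  exact (List.getElem_take).symm

lemma pv_ite_filter {α : Type} (l : List α) (P : α → Bool) (c : Int) :
    (l.map (fun x => if P x then c else 0)).sum
      = ((l.filter P).map (fun _ => c)).sum := by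
  induction l with
  | nil => rfl
  | cons a t ih =>
    by_cases h : P a <;> simp [h, ih]

theorem pv_main (m : List (List String)) (h1 : m ≠ [])
    (h2 : ∀ row ∈ m, (m.headD []).length ≤ row.length) :
    calc_north_weight m = calc_north_weight_alt m := by
  set N : Nat := m.length with hN
  set W : Nat := (m.headD []).length with hWdef
  have hget0 : PySem.List.pyGetD m 0 [] = m.headD [] := by
    rw [PySem.List.pyGetD_zero]; cases m <;> simp
  -- the common double-sum shape
  have key :
      ((PySem.List.pyRange 0 (W : Int) 1).map (fun i =>
        ((PySem.List.pyRange 0 (N : Int) 1).map (fun j =>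
          if PySem.List.pyGetD (PySem.List.pyGetD m j []) i "" == "O" then (N : Int) - j else 0)).sum)).sum
      = calc_north_weight_alt m := by
    rw [pv_sum_comm]
    show _ = calc_north_weight_alt m
    simp only [calc_north_weight_alt]
    rw [PySem.List.enumerate_eq_map_pyRange m [], List.flatMap_map, pv_sum_flatMap,
        PySem.List.len_eq, hget0]
    refine congrArg List.sum (List.map_congr_left ?_)
    intro j hj
    obtain ⟨hj0, hjN⟩ := PySem.List.mem_pyRange_one.mp hj
    have hrow : PySem.List.pyGetD m j [] ∈ m :=
      PySem.List.pyGetD_mem m [] ⟨by omega, by omega⟩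
    have hW2 : W ≤ (PySem.List.pyGetD m j []).length := h2 _ hrow
    rw [PySem.List.slice_to_natCast _ W,
        ← pv_ite_filter ((PySem.List.pyGetD m j []).take W) (fun cell => cell == "O") ((N : Int) - j),
        ← pv_take_map _ W hW2, List.map_map]
    rfl
  rw [← key]
  simp only [calc_north_weight, rotate_matrix_counterclockwise, hget0]
  rw [pv_foldA, zero_add, List.map_map, PySem.List.pyRange_neg_one_eq_reverse]
  have e1 : ((-1 : Int) + 1) = 0 := by ring
  have e2 : ((W : Int) - 1 + 1) = (W : Int) := by ring
  rw [e1, e2, List.map_reverse, List.sum_reverse]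
  refine congrArg List.sum (List.map_congr_left ?_)
  intro i hi
  simp only [Function.comp_apply, pvRowA, List.length_map, PySem.List.length_pyRange_one]
  have e3 : (((m.length : Int) - 0).toNat : Int) = (N : Int) := by omega
  rw [e3]
  refine congrArg List.sum (List.map_congr_left ?_)
  intro idx hidx
  obtain ⟨h0, hN'⟩ := PySem.List.mem_pyRange_one.mp hidx
  rw [PySem.List.pyGetD_map_pyRange_of_nonneg _ _ _ _ h0 (by omega)]

-- ===== VERDICT (by name: the statement is the Claim_ definition above) =====
theorem calc_north_weight_spec : Claim_equal_calc_north_weight := by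
  intro m _ hpre
  exact pv_main m hpre.1 hpre.2
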